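-- pv_equiv track=rewrite | github.com/maximianne/Mexico_Housing | SVM_Currency_HousingIndex.py | x_var
-- ===== SOURCE A (Python) =====
-- def x_var(years):
--     amount = years * 12
--     array = [0] * amount
--     count = 1
--     for i in range(amount):
--         if count <= 12:
--             array[i] = count
--             count += 1
--         else:
--             array[i] = 1
--             count = 2
--     return array
-- ===== SOURCE B (Python) =====
-- def x_var(years):
--     return list(range(1, 13)) * years
-- ===== Notes on version B (the rewrite author's own statement) =====
-- stated objective: faster
-- what changed: Replaces the index loop with a resetting month counter writing into a preallocated zero array by building one 1..12 block and tiling it with list replication.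
import Mathlib
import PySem

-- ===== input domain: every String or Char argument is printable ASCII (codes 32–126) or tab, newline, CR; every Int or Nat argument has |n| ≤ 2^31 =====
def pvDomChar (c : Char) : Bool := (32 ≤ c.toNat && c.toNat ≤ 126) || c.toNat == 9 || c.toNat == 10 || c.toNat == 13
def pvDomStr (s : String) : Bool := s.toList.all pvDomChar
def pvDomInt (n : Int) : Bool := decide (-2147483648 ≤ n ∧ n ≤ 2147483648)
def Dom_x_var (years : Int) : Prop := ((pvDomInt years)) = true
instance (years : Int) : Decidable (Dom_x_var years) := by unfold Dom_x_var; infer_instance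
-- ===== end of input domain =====

-- B builds one 1..12 block and tiles it by list replication instead of A's index loop
-- with a resetting counter; constant-factor faster (C-level list replication, measured).

-- ===== PORT A =====
-- one iteration of A's for-loop body: state is (array, count)
def xvarStep (s : List Int × Int) (i : Int) : List Int × Int :=
  if s.2 ≤ 12 then (s.1.set i.toNat s.2, s.2 + 1)
  else (s.1.set i.toNat 1, 2)

def x_var (years : Int) : List Int :=
  let amount := years * 12
  let array : List Int := List.replicate amount.toNat 0   -- [0] * amount (empty if amount ≤ 0)
  ((PySem.List.pyRange 0 amount 1).foldl xvarStep (array, 1)).1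

-- ===== PORT B =====
def x_var_alt (years : Int) : List Int :=
  (List.replicate years.toNat (PySem.List.pyRange 1 13 1)).flatten   -- list(range(1,13)) * years

-- ===== PRECONDITION & SPEC =====
def Spec_x_var (years : Int) (out : List Int) : Prop := out = x_var_alt years
instance (years : Int) (out : List Int) : Decidable (Spec_x_var years out) := by unfold Spec_x_var; infer_instance

-- ===== CLAIM (what is proved, stated in full; the proofs are below) =====
def Claim_equal_x_var : Prop := ∀ (years : Int), Dom_x_var years → Spec_x_var years (x_var years)

-- ===== LEMMAS AND PROOFS =====

-- the value A writes at index i, and the count after i steps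
def xvarF (i : Nat) : Int := ((i % 12 : Nat) : Int) + 1
def xvarG (m : Nat) : Int := if m = 0 then 1 else (((m - 1) % 12 : Nat) : Int) + 2

lemma set_append_at {α : Type} (A B : List α) (n : Nat) (h : n = A.length) (v : α) :
    (A ++ B).set n v = A ++ B.set 0 v := by
  subst h
  induction A with
  | nil => simp
  | cons a t ih => simp [ih]

-- loop invariant: after m steps the first m slots hold xvarF and count is xvarG m
lemma xvar_inv (amt : Nat) (m : Nat) (hm : m ≤ amt) :
    (PySem.List.pyRange 0 (m : Int) 1).foldl xvarStep (List.replicate amt 0, 1)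
      = ((List.range m).map xvarF ++ List.replicate (amt - m) 0, xvarG m) := by
  induction m with
  | zero => simp [PySem.List.pyRange_one_eq_nil, xvarG]
  | succ k ih =>
    have hk : k ≤ amt := Nat.le_of_succ_le hm
    have hsplit : (PySem.List.pyRange 0 ((k : Int) + 1) 1)
        = PySem.List.pyRange 0 (k : Int) 1 ++ [(k : Int)] :=
      PySem.List.pyRange_one_succ_right (by exact_mod_cast Nat.zero_le k)
    have hc : ((k : Int) + 1) = ((k + 1 : Nat) : Int) := by push_cast; ring
    rw [← hc, hsplit, List.foldl_append, ih hk]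
    -- one more step at index k
    have hlen : ((List.range k).map xvarF).length = k := by simp
    have hrep : List.replicate (amt - k) (0 : Int) = 0 :: List.replicate (amt - (k+1)) 0 := by
      have : amt - k = (amt - (k+1)) + 1 := by omega
      rw [this, List.replicate_succ]
    have hset : ∀ v : Int,
        ((List.range k).map xvarF ++ List.replicate (amt - k) 0).set (Int.toNat (k : Int)) v
          = (List.range k).map xvarF ++ v :: List.replicate (amt - (k+1)) 0 := by
      intro v
      rw [Int.toNat_natCast, set_append_at _ _ _ hlen.symm v, hrep]
      simp [List.set]
    have hrange : (List.range (k+1)).map xvarF = (List.range k).map xvarF ++ [xvarF k] := by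
      rw [List.range_succ]; simp
    rcases Nat.eq_zero_or_pos k with h0 | hpos
    · subst h0
      have h1 : List.replicate amt (0:Int) = 0 :: List.replicate (amt - 1) 0 := by
        simpa using hrep
      simp [xvarStep, xvarG, xvarF, h1, List.range_succ]
    · have hk0 : k ≠ 0 := Nat.pos_iff_ne_zero.mp hpos
      simp only [List.foldl_cons, List.foldl_nil, xvarStep, xvarG, if_neg hk0]
      by_cases hb : ((((k - 1) % 12 : Nat) : Int) + 2) ≤ 12
      · -- then-branch: count = (k-1)%12+2 ≤ 12, so (k-1)%12 ≤ 10 hence k%12 = (k-1)%12+1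
        rw [if_pos hb, hset _]
        have h10 : (k - 1) % 12 ≤ 10 := by omega
        have hmod : k % 12 = (k - 1) % 12 + 1 := by omega
        have hv : xvarF k = ((((k - 1) % 12 : Nat) : Int)) + 2 := by
          simp only [xvarF, hmod]; push_cast; ring
        simp only [Prod.mk.injEq, if_neg (Nat.succ_ne_zero k), Nat.succ_sub_one]
        refine ⟨?_, by omega⟩
        rw [hrange, ← hv, List.append_cons]
      · -- else-branch: (k-1)%12 = 11, so k%12 = 0; write 1, count := 2
        rw [if_neg hb, hset 1]
        have h11 : (k - 1) % 12 = 11 := by omega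
        have hmod : k % 12 = 0 := by omega
        have hv : xvarF k = 1 := by simp [xvarF, hmod]
        simp only [Prod.mk.injEq, if_neg (Nat.succ_ne_zero k), Nat.succ_sub_one]
        refine ⟨?_, by omega⟩
        rw [hrange, ← hv, List.append_cons]
  
-- the written values tile into copies of the block [1,…,12]
lemma xvar_tile (n : Nat) :
    (List.range (12 * n)).map xvarF
      = (List.replicate n (PySem.List.pyRange 1 13 1)).flatten := by
  induction n with
  | zero => simp
  | succ k ih =>
    have h12 : 12 * (k + 1) = 12 * k + 12 := by ring
    rw [h12, List.range_add, List.map_append, ih, List.replicate_succ',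
        List.flatten_append]
    congr 1
    have hblock : PySem.List.pyRange 1 13 1 = [1,2,3,4,5,6,7,8,9,10,11,12] := by decide
    rw [hblock]
    simp only [List.map_map]
    simp [Function.comp, List.range_succ, xvarF]

-- ===== VERDICT (by name: the statement is the Claim_ definition above) =====
theorem x_var_spec : Claim_equal_x_var := by
  intro years _
  unfold Spec_x_var x_var x_var_alt
  change ((PySem.List.pyRange 0 (years * 12) 1).foldl xvarStep
      (List.replicate (years * 12).toNat 0, 1)).1
    = (List.replicate years.toNat (PySem.List.pyRange 1 13 1)).flatten
  by_cases hy : years ≤ 0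
  · have hamt : years * 12 ≤ 0 := by nlinarith
    have : (years * 12).toNat = 0 := Int.toNat_of_nonpos hamt
    rw [PySem.List.pyRange_one_eq_nil hamt, this]
    have : years.toNat = 0 := Int.toNat_of_nonpos hy
    simp [this]
  · rw [not_le] at hy
    have hn : years = (years.toNat : Int) := (Int.toNat_of_nonneg hy.le).symm
    set n := years.toNat with hn'
    have hamt : years * 12 = ((12 * n : Nat) : Int) := by rw [hn]; push_cast; ring
    rw [hamt]
    have := xvar_inv (12 * n) (12 * n) (le_refl _)
    rw [Int.toNat_natCast, this]
    simp [xvar_tile n]
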